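-- pv_equiv track=rewrite | github.com/tihanaujevic/algorithms_in_Bioinformatics | chapter6/BA6H.py | get_colored_edges
-- ===== SOURCE A (Python) =====
-- def chromosome_to_cycle(permutation):
--     cycle = []
--     for x in permutation:
--         if x > 0:
--             cycle.extend([2 * x - 1, 2 * x])
--         if x < 0:
--             x = abs(x)
--             cycle.extend([2 * x, 2 * x - 1])
--     return cycle
--
-- def get_colored_edges(chromosomes):
--     edges = []
--     for chrom in chromosomes:
--         nodes = chromosome_to_cycle(chrom)
--         for j in range(1, len(nodes) - 1, 2):
--             edges.append((nodes[j], nodes[j + 1]))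
--         edges.append((nodes[-1], nodes[0]))
--
--     return repr(edges)[1:-1]
-- ===== SOURCE B (Python) =====
-- def get_colored_edges(chromosomes):
--     # Single streaming pass: format each edge string directly from the previous
--     # element's tail and the current element's head; no node list, no indexing.
--     def head(x):
--         return 2 * x - 1 if x > 0 else -2 * x
--
--     def tail(x):
--         return 2 * x if x > 0 else -2 * x - 1
--
--     parts = []
--     for chrom in chromosomes:
--         sig = [x for x in chrom if x != 0]
--         if not sig:
--             continue
--         first, rest = sig[0], sig[1:]
--         prev = first
--         for x in rest:
--             parts.append("(%d, %d)" % (tail(prev), head(x)))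
--             prev = x
--         parts.append("(%d, %d)" % (tail(prev), head(first)))
--     return ", ".join(parts)
-- ===== Notes on version B (the rewrite author's own statement) =====
-- stated objective: alternative
-- what changed: B makes one streaming pass per chromosome over its nonzero elements with a (first, prev) accumulator, formatting each edge string directly from prev's tail and the current element's head (plus a closing edge) and joining them, instead of A's staged flat doubled node list, stride-2 index pairing into a tuple list, and repr(list)[1:-1] slicing.
import Mathlib
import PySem

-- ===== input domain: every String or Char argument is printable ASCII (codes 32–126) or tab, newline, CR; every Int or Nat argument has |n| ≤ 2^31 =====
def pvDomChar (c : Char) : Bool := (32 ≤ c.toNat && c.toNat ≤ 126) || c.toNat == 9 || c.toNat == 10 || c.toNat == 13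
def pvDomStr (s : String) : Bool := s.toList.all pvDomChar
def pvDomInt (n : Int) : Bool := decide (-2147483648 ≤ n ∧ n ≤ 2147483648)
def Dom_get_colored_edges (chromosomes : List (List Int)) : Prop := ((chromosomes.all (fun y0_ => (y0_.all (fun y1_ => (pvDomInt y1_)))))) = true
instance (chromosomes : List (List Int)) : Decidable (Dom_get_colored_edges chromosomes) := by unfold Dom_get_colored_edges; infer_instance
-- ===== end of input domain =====

-- B makes one streaming pass per chromosome over its nonzero elements with a (first, prev)
-- accumulator, formatting each edge string directly (plus a closing edge) and joining them,
-- instead of A's flat doubled node list, stride-2 index pairing and repr(list)[1:-1] slicing;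
-- objective: alternative decomposition, same cost.

-- "(%d, %d)" formatting of one edge (= Python's repr of a 2-tuple of ints), shared formatter
def pvFmt (a b : Int) : List Char :=
  ['('] ++ PySem.Int.toChars a ++ [',', ' '] ++ PySem.Int.toChars b ++ [')']

-- ===== PORT A =====
def chromosome_to_cycle (permutation : List Int) : List Int :=
  permutation.foldl (fun cycle x =>
    let cycle := if 0 < x then cycle ++ [2 * x - 1, 2 * x] else cycle
    if x < 0 then cycle ++ [2 * |x|, 2 * |x| - 1] else cycle) []

-- repr of one int pair "(a, b)"
def pyReprPair (p : Int × Int) : List Char := pvFmt p.1 p.2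

def get_colored_edges (chromosomes : List (List Int)) : String :=
  let edges := chromosomes.foldl (fun edges chrom =>
    let nodes := chromosome_to_cycle chrom
    let edges := (PySem.List.pyRange 1 ((nodes.length : Int) - 1) 2).foldl
      (fun edges j => edges ++ [(PySem.List.pyGetD nodes j 0, PySem.List.pyGetD nodes (j + 1) 0)]) edges
    -- nodes[-1] raises IndexError on empty nodes (excluded by Pre_); pyGetD's default is unreachable inside Pre_
    edges ++ [(PySem.List.pyGetD nodes (-1) 0, PySem.List.pyGetD nodes 0 0)]) []
  -- repr(edges)[1:-1]
  String.ofList (PySem.List.slice (['['] ++ PySem.Chars.join [',', ' '] (edges.map pyReprPair) ++ [']'])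
    (some 1) (some (-1)))

-- ===== PORT B =====
def pvHead (x : Int) : Int := if 0 < x then 2 * x - 1 else -2 * x
def pvTail (x : Int) : Int := if 0 < x then 2 * x else -2 * x - 1

def get_colored_edges_alt (chromosomes : List (List Int)) : String :=
  let parts := chromosomes.foldl (fun parts chrom =>
    match chrom.filter (fun x => x != 0) with
    | [] => parts
    | first :: rest =>
      let s := rest.foldl (fun (s : Int × List (List Char)) x =>
        (x, s.2 ++ [pvFmt (pvTail s.1) (pvHead x)])) (first, parts)
      s.2 ++ [pvFmt (pvTail s.1) (pvHead first)]) []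
  String.ofList (PySem.Chars.join [',', ' '] parts)

-- ===== PRECONDITION & SPEC =====
-- Pre_ excludes inputs containing a chromosome with no nonzero element: there A's nodes[-1] raises IndexError.
def Pre_get_colored_edges (chromosomes : List (List Int)) : Prop :=
  ∀ chrom ∈ chromosomes, ∃ x ∈ chrom, x ≠ 0
instance (chromosomes : List (List Int)) : Decidable (Pre_get_colored_edges chromosomes) := by
  unfold Pre_get_colored_edges; infer_instance
def pvWitness_get_colored_edges : List (List Int) := [[1, -2], [3]]

def Spec_get_colored_edges (chromosomes : List (List Int)) (out : String) : Prop :=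
  out = get_colored_edges_alt chromosomes
instance (chromosomes : List (List Int)) (out : String) : Decidable (Spec_get_colored_edges chromosomes out) := by
  unfold Spec_get_colored_edges; infer_instance

-- ===== CLAIM (what is proved, stated in full; the proofs are below) =====
def Claim_equal_get_colored_edges : Prop := ∀ (chromosomes : List (List Int)), Dom_get_colored_edges chromosomes → Pre_get_colored_edges chromosomes → Spec_get_colored_edges chromosomes (get_colored_edges chromosomes)

-- ===== LEMMAS AND PROOFS =====

-- per-element (head, tail) labels, and the pair list a chromosome spreads to
def pairOf (x : Int) : Int × Int := (pvHead x, pvTail x)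

def pairsOf (chrom : List Int) : List (Int × Int) :=
  (chrom.filter (fun x => x != 0)).map pairOf

-- the flat doubled list a pair list spreads to
def pvFlat (pairs : List (Int × Int)) : List Int := pairs.flatMap (fun p => [p.1, p.2])

-- A's per-chromosome edge list, indexed with wrap-around
def pvBedges (pairs : List (Int × Int)) : List (Int × Int) :=
  (List.range pairs.length).map (fun i =>
    ((pairs.getD i (0, 0)).2, (pairs.getD ((i + 1) % pairs.length) (0, 0)).1))

-- consecutive tail→head edges along a chain of pairs
def chainP : (Int × Int) → List (Int × Int) → List (Int × Int)
  | _, [] => []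
  | p, q :: t => (p.2, q.1) :: chainP q t

theorem pv_cycle_eq (chrom : List Int) : chromosome_to_cycle chrom = pvFlat (pairsOf chrom) := by
  unfold chromosome_to_cycle
  rw [PySem.List.foldl_congr_mem chrom _
    (fun acc x => acc ++ (if 0 < x then [2 * x - 1, 2 * x]
      else if x < 0 then [2 * |x|, 2 * |x| - 1] else [])) []
    (by intro acc x _
        rcases lt_trichotomy x 0 with h | h | h
        · simp [h, not_lt.mpr h.le, abs_of_neg]
        · simp [h]
        · simp [h, not_lt.mpr h.le])]
  rw [PySem.List.foldl_append_eq_flatMap]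
  simp only [List.nil_append]
  induction chrom with
  | nil => rfl
  | cons x xs ih =>
    rcases lt_trichotomy x 0 with h | h | h
    · simp_all [pvFlat, pairsOf, pairOf, pvHead, pvTail, h.ne, abs_of_neg, not_lt.mpr h.le]
    · simp_all [pvFlat, pairsOf]
    · simp_all [pvFlat, pairsOf, pairOf, pvHead, pvTail, h.ne']

theorem pv_flat_length (pairs : List (Int × Int)) : (pvFlat pairs).length = 2 * pairs.length := by
  induction pairs with
  | nil => rfl
  | cons p t ih => simp [pvFlat] at ih ⊢; omega

theorem pv_flat_getD (pairs : List (Int × Int)) (i : Nat) (hi : i < pairs.length) :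
    (pvFlat pairs).getD (2 * i) 0 = (pairs.getD i (0, 0)).1 ∧
    (pvFlat pairs).getD (2 * i + 1) 0 = (pairs.getD i (0, 0)).2 := by
  induction pairs generalizing i with
  | nil => simp at hi
  | cons p t ih =>
    cases i with
    | zero => simp [pvFlat]
    | succ j =>
      have := ih j (by simpa using hi)
      have h2 : 2 * (j + 1) = (2 * j + 1) + 1 := by ring
      simpa [pvFlat, h2] using this

theorem pv_inner_eq (chrom : List Int) (h : pairsOf chrom ≠ []) (acc : List (Int × Int)) :
    (let nodes := chromosome_to_cycle chrom
     ((PySem.List.pyRange 1 ((nodes.length : Int) - 1) 2).foldl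
        (fun edges j => edges ++ [(PySem.List.pyGetD nodes j 0, PySem.List.pyGetD nodes (j + 1) 0)]) acc)
      ++ [(PySem.List.pyGetD nodes (-1) 0, PySem.List.pyGetD nodes 0 0)])
    = acc ++ pvBedges (pairsOf chrom) := by
  set pairs := pairsOf chrom with hp
  set k := pairs.length with hk
  have hk1 : 1 ≤ k := by
    rcases pairs with _ | ⟨p, t⟩
    · exact absurd rfl h
    · simp [hk]
  have hk1' : 1 ≤ pairs.length := hk ▸ hk1
  have hnodes : chromosome_to_cycle chrom = pvFlat pairs := pv_cycle_eq chrom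
  have hlen : (chromosome_to_cycle chrom).length = 2 * k := by rw [hnodes]; exact pv_flat_length pairs
  simp only [hnodes, PySem.List.foldl_append_singleton_eq_map]
  rw [show (pvFlat pairs).length = 2 * k from pv_flat_length pairs]
  have hrange : PySem.List.pyRange 1 ((2 * k : Nat) - 1 : Int) 2
      = (List.range (k - 1)).map (fun (i : Nat) => (1 : Int) + 2 * (i : Int)) := by
    rw [PySem.List.pyRange_of_pos 1 ((2 * k : Nat) - 1 : Int) (by norm_num)]
    have hN : (if (1 : Int) < ((2 * k : Nat) : Int) - 1
        then ((((2 * k : Nat) : Int) - 1 - 1 + 2 - 1) / 2).toNat else 0) = k - 1 := by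
      split_ifs with hc
      · push_cast at hc ⊢; omega
      · push_cast at hc; omega
    rw [hN]
  rw [hrange, List.map_map]
  have hmid : (List.range (k - 1)).map ((fun j => (PySem.List.pyGetD (pvFlat pairs) j 0,
        PySem.List.pyGetD (pvFlat pairs) (j + 1) 0)) ∘ (fun (i : Nat) => (1 : Int) + 2 * (i : Int)))
      = (List.range (k - 1)).map (fun i =>
        ((pairs.getD i (0, 0)).2, (pairs.getD (i + 1) (0, 0)).1)) := by
    apply List.map_congr_left
    intro i hi
    rw [List.mem_range] at hi
    have c1 : ((1 : Int) + 2 * i) = ((2 * i + 1 : Nat) : Int) := by push_cast; ring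
    have c2 : ((2 * i + 1 : Nat) : Int) + 1 = ((2 * (i + 1) : Nat) : Int) := by push_cast; ring
    simp only [Function.comp, c1, c2, PySem.List.pyGetD_natCast]
    rw [(pv_flat_getD pairs i (by omega)).2, (pv_flat_getD pairs (i + 1) (by omega)).1]
  rw [hmid]
  have hne : pvFlat pairs ≠ [] := by
    intro hnil
    have h2 := pv_flat_length pairs
    rw [hnil] at h2
    simp only [List.length_nil] at h2
    omega
  have hlast : PySem.List.pyGetD (pvFlat pairs) (-1) 0 = (pairs.getD (k - 1) (0, 0)).2 := by
    rw [show ((-1 : Int)) = -((1 : Nat) : Int) by norm_num,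
      PySem.List.pyGetD_neg_natCast _ _ _ (by omega) (by rw [pv_flat_length]; omega)]
    have hidx : (pvFlat pairs).length - 1 = 2 * (k - 1) + 1 := by rw [pv_flat_length]; omega
    rw [← List.getD_eq_getElem _ 0 (by rw [pv_flat_length]; omega)]
    rw [hidx]
    exact (pv_flat_getD pairs (k - 1) (by omega)).2
  have hfirst : PySem.List.pyGetD (pvFlat pairs) 0 0 = (pairs.getD 0 (0, 0)).1 := by
    rw [show ((0 : Int)) = ((0 : Nat) : Int) by norm_num, PySem.List.pyGetD_natCast]
    simpa using (pv_flat_getD pairs 0 (by omega)).1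
  rw [hlast, hfirst]
  unfold pvBedges
  rw [← hk, show k = (k - 1) + 1 by omega, List.range_succ, List.map_append]
  rw [show (k - 1) + 1 = k by omega]
  have hsplit : (List.range (k - 1)).map (fun i =>
        ((pairs.getD i (0, 0)).2, (pairs.getD ((i + 1) % k) (0, 0)).1))
      = (List.range (k - 1)).map (fun i =>
        ((pairs.getD i (0, 0)).2, (pairs.getD (i + 1) (0, 0)).1)) := by
    apply List.map_congr_left
    intro i hi
    rw [List.mem_range] at hi
    rw [Nat.mod_eq_of_lt (by omega)]
  rw [hsplit]
  simp only [List.map_cons, List.map_nil, show k - 1 + 1 = k from by omega, Nat.mod_self]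
  simp [List.append_assoc]

theorem pv_slice_mid (s : List Char) :
    PySem.List.slice (['['] ++ s ++ [']']) (some 1) (some (-1)) = s := by
  rw [show ['['] ++ s ++ [']'] = '[' :: (s ++ [']']) by simp]
  simp [PySem.List.slice, PySem.List.clampIdx]
  rw [if_neg (by omega)]
  simp

-- chainP length and elements
theorem chainP_length (p : Int × Int) (ps : List (Int × Int)) :
    (chainP p ps).length = ps.length := by
  induction ps generalizing p with
  | nil => rfl
  | cons q t ih => simp [chainP, ih]

theorem chainP_getD (p : Int × Int) (ps : List (Int × Int)) (i : Nat) (hi : i < ps.length) :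
    (chainP p ps).getD i (0, 0) = (((p :: ps).getD i (0, 0)).2, (ps.getD i (0, 0)).1) := by
  induction ps generalizing p i with
  | nil => simp at hi
  | cons q t ih =>
    cases i with
    | zero => simp [chainP]
    | succ j => simpa [chainP] using ih q j (by simpa using hi)

theorem pv_getD_last (p : Int × Int) (ps : List (Int × Int)) :
    (p :: ps).getD ps.length (0, 0) = ps.getLastD p := by
  induction ps generalizing p with
  | nil => rfl
  | cons q t ih =>
    simp only [List.length_cons, List.getD_cons_succ, List.getLastD_cons]
    exact ih q

-- the mod-indexed edge list is the chain plus the wrap-around edge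
theorem pvBedges_cons (p : Int × Int) (ps : List (Int × Int)) :
    pvBedges (p :: ps) = chainP p ps ++ [((ps.getLastD p).2, p.1)] := by
  apply List.ext_getElem
  · simp [pvBedges, chainP_length]
  · intro i h1 h2
    simp only [pvBedges, List.length_cons, List.getElem_map, List.getElem_range] at h1 ⊢
    simp only [List.length_map, List.length_range] at h1
    by_cases hi : i < ps.length
    · rw [List.getElem_append_left (by simpa [chainP_length] using hi)]
      rw [← List.getD_eq_getElem _ (0, 0) (by simpa [chainP_length] using hi)]
      rw [chainP_getD p ps i hi]
      rw [Nat.mod_eq_of_lt (by omega)]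
      rw [List.getD_cons_succ]
    · have hie : i = ps.length := by omega
      subst hie
      rw [List.getElem_append_right (by simp [chainP_length])]
      simp only [chainP_length, Nat.sub_self, List.getElem_singleton]
      rw [Nat.mod_self]
      rw [pv_getD_last, List.getD_cons_zero]

theorem pv_getLastD_map (f : Int → Int × Int) (d : Int) (rest : List Int) :
    (rest.map f).getLastD (f d) = f (rest.getLastD d) := by
  induction rest generalizing d with
  | nil => rfl
  | cons x t ih =>
    simp only [List.map_cons, List.getLastD_cons]
    exact ih x

-- B's inner streaming fold produces the chain edges, formatted
theorem pv_bfold (rest : List Int) (prev : Int) (parts : List (List Char)) :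
    rest.foldl (fun (s : Int × List (List Char)) x =>
        (x, s.2 ++ [pvFmt (pvTail s.1) (pvHead x)])) (prev, parts)
    = (rest.getLastD prev,
       parts ++ (chainP (pairOf prev) (rest.map pairOf)).map (fun e => pvFmt e.1 e.2)) := by
  induction rest generalizing prev parts with
  | nil => simp [chainP]
  | cons x t ih =>
    simp only [List.foldl_cons, List.map_cons, chainP, List.getLastD_cons]
    rw [ih x]
    simp [pairOf, List.append_assoc]

theorem pv_b_inner (chrom : List Int) (f : Int) (rest : List Int)
    (hf : chrom.filter (fun x => x != 0) = f :: rest) (parts : List (List Char)) :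
    ((rest.foldl (fun (s : Int × List (List Char)) x =>
        (x, s.2 ++ [pvFmt (pvTail s.1) (pvHead x)])) (f, parts)).2
      ++ [pvFmt (pvTail (rest.foldl (fun (s : Int × List (List Char)) x =>
        (x, s.2 ++ [pvFmt (pvTail s.1) (pvHead x)])) (f, parts)).1) (pvHead f)])
    = parts ++ (pvBedges (pairsOf chrom)).map pyReprPair := by
  have hp : pairsOf chrom = pairOf f :: rest.map pairOf := by
    rw [pairsOf, hf, List.map_cons]
  rw [hp, pvBedges_cons, pv_bfold]
  rw [pv_getLastD_map pairOf f rest]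
  simp [pyReprPair, pairOf, List.map_append, List.append_assoc]

theorem pv_pairs_ne_nil (chrom : List Int) (h : ∃ x ∈ chrom, x ≠ 0) : pairsOf chrom ≠ [] := by
  obtain ⟨x, hx, hx0⟩ := h
  simp only [pairsOf, ne_eq, List.map_eq_nil_iff, List.filter_eq_nil_iff]
  intro hall
  exact absurd (by simpa using hall x hx) (by simpa using hx0)

-- both outer folds agree, up to formatting A's tuples
theorem pv_main (chroms : List (List Int)) (hpre : ∀ chrom ∈ chroms, ∃ x ∈ chrom, x ≠ 0)
    (eds : List (Int × Int)) :
    chroms.foldl (fun parts chrom =>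
      match chrom.filter (fun x => x != 0) with
      | [] => parts
      | first :: rest =>
        let s := rest.foldl (fun (s : Int × List (List Char)) x =>
          (x, s.2 ++ [pvFmt (pvTail s.1) (pvHead x)])) (first, parts)
        s.2 ++ [pvFmt (pvTail s.1) (pvHead first)]) (eds.map pyReprPair)
    = (chroms.foldl (fun edges chrom =>
        let nodes := chromosome_to_cycle chrom
        let edges := (PySem.List.pyRange 1 ((nodes.length : Int) - 1) 2).foldl
          (fun edges j => edges ++ [(PySem.List.pyGetD nodes j 0, PySem.List.pyGetD nodes (j + 1) 0)]) edges
        edges ++ [(PySem.List.pyGetD nodes (-1) 0, PySem.List.pyGetD nodes 0 0)]) eds).map pyReprPair := by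
  induction chroms generalizing eds with
  | nil => rfl
  | cons c t ih =>
    have hc : pairsOf c ≠ [] := pv_pairs_ne_nil c (hpre c (by simp))
    obtain ⟨f, rest, hf⟩ : ∃ f rest, c.filter (fun x => x != 0) = f :: rest := by
      rcases hfe : c.filter (fun x => x != 0) with _ | ⟨f, rest⟩
      · exact absurd (by simp [pairsOf, hfe]) hc
      · exact ⟨f, rest, rfl⟩
    simp only [List.foldl_cons, hf]
    rw [pv_b_inner c f rest hf (eds.map pyReprPair)]
    rw [pv_inner_eq c hc eds]
    rw [← List.map_append]
    exact ih (fun chrom hm => hpre chrom (by simp [hm])) _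

-- ===== VERDICT (by name: the statement is the Claim_ definition above) =====
theorem get_colored_edges_spec : Claim_equal_get_colored_edges := by
  intro chromosomes _ hpre
  have h := pv_main chromosomes hpre []
  simp only [List.map_nil] at h
  unfold Spec_get_colored_edges get_colored_edges get_colored_edges_alt
  simp only []
  rw [pv_slice_mid, h]
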